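-- pv_equiv track=rewrite | github.com/ELMERWANG/PEAttack | 1dcnn_lstm_knn_rfr_lr_model/help_func.py | find_indices
-- ===== SOURCE A (Python) =====
-- def find_indices(lst, value):
--     '''Used with get_attack_data function'''
--     start_index = None
--     end_index = None
--
--     for i, v in enumerate(lst):
--         if v == value and start_index is None:
--             start_index = i
--         elif start_index is not None and v != value:
--             end_index = i - 1  # The last occurrence of the consecutive sequence
--             break
--
--     # If the sequence goes till the end of the list
--     if start_index is not None and end_index is None:
--         end_index = len(lst) - 1
--     return start_index, end_index
-- ===== SOURCE B (Python) =====
-- def find_indices(lst, value):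
--     '''Two-pointer run partition: scan maximal consecutive runs; the first
--     run whose element equals value gives (start, end).'''
--     i, n = 0, len(lst)
--     while i < n:
--         j = i
--         while j < n and lst[j] == lst[i]:
--             j += 1
--         if lst[i] == value:
--             return i, j - 1
--         i = j
--     return None, None
-- ===== Notes on version B (the rewrite author's own statement) =====
-- stated objective: alternative
-- what changed: Replaces A's stateful enumerate loop with start/end sentinels and a post-loop patch by a two-pointer scan over maximal consecutive runs that returns directly from the first run matching value.
import Mathlib
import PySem

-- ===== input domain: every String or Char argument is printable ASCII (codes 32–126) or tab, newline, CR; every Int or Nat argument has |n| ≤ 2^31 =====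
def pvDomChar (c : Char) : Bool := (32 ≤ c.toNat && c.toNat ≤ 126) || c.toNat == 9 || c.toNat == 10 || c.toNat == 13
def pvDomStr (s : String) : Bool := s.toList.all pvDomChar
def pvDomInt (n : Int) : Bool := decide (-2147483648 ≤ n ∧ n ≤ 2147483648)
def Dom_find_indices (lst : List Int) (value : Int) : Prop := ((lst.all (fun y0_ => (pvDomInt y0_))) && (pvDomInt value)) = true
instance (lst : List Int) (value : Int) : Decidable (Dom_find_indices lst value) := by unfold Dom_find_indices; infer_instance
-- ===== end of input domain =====

-- B replaces A's stateful index loop (start/end sentinels, break, post-loop patch)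
-- by a two-pointer scan over maximal consecutive runs (objective: alternative).

-- ===== PORT A =====
-- A's for-loop with index i and state start_index; returning from the `break` branch
-- carries end_index = i - 1; falling off the list leaves end_index = None.
def findIndicesLoop (value : Int) : List Int → Int → Option Int → Option Int × Option Int
  | [], _, s => (s, none)
  | v :: rest, i, s =>
    if v = value ∧ s = none then findIndicesLoop value rest (i + 1) (some i)
    else if s ≠ none ∧ v ≠ value then (s, some (i - 1))
    else findIndicesLoop value rest (i + 1) s

def find_indices (lst : List Int) (value : Int) : Option Int × Option Int :=
  let r := findIndicesLoop value lst 0 none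
  if r.1 ≠ none ∧ r.2 = none then (r.1, some ((lst.length : Int) - 1)) else r

-- ===== PORT B =====
-- B's outer while-loop over runs: the head x and its run xs.takeWhile (· = x);
-- offset `off` is the absolute index of x.
def findIndicesRuns (value : Int) : List Int → Int → Option Int × Option Int
  | [], _ => (none, none)
  | x :: xs, off =>
    let run := xs.takeWhile (fun y => y = x)
    let rest := xs.dropWhile (fun y => y = x)
    if x = value then (some off, some (off + (1 + (run.length : Int)) - 1))
    else findIndicesRuns value rest (off + 1 + (run.length : Int))
termination_by l _ => l.length
decreasing_by
  simpa using Nat.lt_succ_of_le (List.length_dropWhile_le _ _)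

def find_indices_alt (lst : List Int) (value : Int) : Option Int × Option Int :=
  findIndicesRuns value lst 0

-- ===== PRECONDITION & SPEC =====
def Spec_find_indices (lst : List Int) (value : Int) (out : Option Int × Option Int) : Prop := out = find_indices_alt lst value
instance (lst : List Int) (value : Int) (out : Option Int × Option Int) : Decidable (Spec_find_indices lst value out) := by unfold Spec_find_indices; infer_instance

-- ===== CLAIM (what is proved, stated in full; the proofs are below) =====
def Claim_equal_find_indices : Prop := ∀ (lst : List Int) (value : Int), Dom_find_indices lst value → Spec_find_indices lst value (find_indices lst value)

-- ===== LEMMAS AND PROOFS =====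

-- Once started (s = some j), A's loop scans the run of `value`; it breaks at the first
-- non-value (end = that index - 1) or runs off the list (end = none).
theorem findIndicesLoop_some (value : Int) :
    ∀ (lst : List Int) (i : Int) (j : Int),
      findIndicesLoop value lst i (some j) =
        (let t := lst.takeWhile (fun y => y = value)
         if t.length = lst.length then ((some j : Option Int), (none : Option Int))
         else (some j, some (i + (t.length : Int) - 1))) := by
  intro lst
  induction lst with
  | nil => intro i j; simp [findIndicesLoop]
  | cons v rest ih =>
    intro i j
    by_cases hv : v = value
    · subst hv
      rw [findIndicesLoop]
      rw [if_neg (by simp), if_neg (by simp)]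
      rw [ih (i + 1) j]
      simp only [List.takeWhile, decide_true, List.length_cons]
      by_cases h : (rest.takeWhile (fun y => y = v)).length = rest.length
      · simp [h]
      · rw [if_neg h, if_neg (by omega)]
        simp only [Prod.mk.injEq, Option.some.injEq, true_and]
        push_cast
        ring
    · rw [findIndicesLoop]
      rw [if_neg (by simp [hv]), if_pos (by simp [hv])]
      simp only [List.takeWhile, hv, decide_false, List.length_cons]
      rw [if_neg (by simp)]
      simp
-- Skipping one non-value element is the same as B's run machinery applied to it.
theorem findIndicesRuns_skip (value : Int) (x : Int) (xs : List Int) (off : Int)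
    (hx : x ≠ value) :
    findIndicesRuns value (x :: xs) off = findIndicesRuns value xs (off + 1) := by
  cases xs with
  | nil => simp [findIndicesRuns, hx]
  | cons y ys =>
    by_cases hyx : y = x
    · subst hyx
      rw [findIndicesRuns, findIndicesRuns]
      simp only [if_neg hx]
      simp only [List.takeWhile, List.dropWhile, decide_true, List.length_cons]
      congr 1
      push_cast
      ring
    · rw [findIndicesRuns]
      simp [hx, List.takeWhile, List.dropWhile, hyx]
-- Main loop invariant: A's loop result, patched with `off + lst.length - 1` when it ran
-- to the end after starting, equals B's run scan from offset `off`.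
theorem main_invariant (value : Int) :
    ∀ (lst : List Int) (off : Int),
      (let r := findIndicesLoop value lst off none
       if r.1 ≠ none ∧ r.2 = none then (r.1, some (off + (lst.length : Int) - 1)) else r)
        = findIndicesRuns value lst off := by
  intro lst
  induction lst with
  | nil => intro off; simp [findIndicesLoop, findIndicesRuns]
  | cons x xs ih =>
    intro off
    by_cases hx : x = value
    · subst hx
      simp only
      rw [findIndicesLoop]
      rw [if_pos (show x = x ∧ (none : Option Int) = none from ⟨rfl, rfl⟩)]
      rw [findIndicesLoop_some]
      rw [findIndicesRuns]

      by_cases h : (xs.takeWhile (fun y => y = x)).length = xs.length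
      · rw [if_pos h]
        simp only [List.length_cons]
        push_cast
        simp [h]
        ring
      · rw [if_neg h]
        simp only [List.length_cons]
        push_cast
        simp
        ring
    · have step : findIndicesLoop value (x :: xs) off none = findIndicesLoop value xs (off + 1) none := by
        rw [findIndicesLoop]
        rw [if_neg (by simp [hx]), if_neg (by simp)]
      simp only
      rw [step, findIndicesRuns_skip value x xs off hx, ← ih (off + 1)]
      simp only [List.length_cons]
      by_cases hc : (findIndicesLoop value xs (off + 1) none).1 ≠ none ∧
          (findIndicesLoop value xs (off + 1) none).2 = none
      · rw [if_pos hc, if_pos hc]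
        simp only [Prod.mk.injEq, Option.some.injEq, true_and]
        push_cast
        ring
      · rw [if_neg hc, if_neg hc]
-- ===== VERDICT (by name: the statement is the Claim_ definition above) =====
theorem find_indices_spec : Claim_equal_find_indices := by
  intro lst value _
  unfold Spec_find_indices find_indices find_indices_alt
  have h := main_invariant value lst 0
  simp only at h
  rw [← h]
  by_cases hc : (findIndicesLoop value lst 0 none).1 ≠ none ∧ (findIndicesLoop value lst 0 none).2 = none
  · rw [if_pos hc, if_pos hc]
    simp only [Prod.mk.injEq, Option.some.injEq, true_and]
    ring
  · rw [if_neg hc, if_neg hc]
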